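-- pv_equiv track=rewrite | github.com/Suffix30/BBOT-Xtension | host/bbot_host.py | merge_table_row
-- ===== SOURCE A (Python) =====
-- def merge_table_row(row_chunks):
--     width = max(len(chunk) for chunk in row_chunks)
--     merged = [""] * width
--     for chunk in row_chunks:
--         for index in range(width):
--             value = chunk[index].strip() if index < len(chunk) else ""
--             if value:
--                 merged[index] += value
--     return merged
-- ===== SOURCE B (Python) =====
-- def _merge2(acc, chunk):
--     out = [a + c.strip() for a, c in zip(acc, chunk)]
--     if len(chunk) > len(acc):
--         out += [c.strip() for c in chunk[len(acc):]]
--     else: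
--         out += acc[len(chunk):]
--     return out
--
--
-- def merge_table_row(row_chunks):
--     merged = []
--     for chunk in row_chunks:
--         merged = _merge2(merged, chunk)
--     return merged
-- ===== Notes on version B (the rewrite author's own statement) =====
-- stated objective: simpler
-- what changed: Replaces A's preallocated width-sized buffer with nested index loops by a left fold of a binary row-merge (zip the rows, pad with the longer tail), so no width precomputation and no index arithmetic remain.
-- outside the precondition, e.g. on merge_table_row([]): A raises ValueError, B returns []
import Mathlib
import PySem

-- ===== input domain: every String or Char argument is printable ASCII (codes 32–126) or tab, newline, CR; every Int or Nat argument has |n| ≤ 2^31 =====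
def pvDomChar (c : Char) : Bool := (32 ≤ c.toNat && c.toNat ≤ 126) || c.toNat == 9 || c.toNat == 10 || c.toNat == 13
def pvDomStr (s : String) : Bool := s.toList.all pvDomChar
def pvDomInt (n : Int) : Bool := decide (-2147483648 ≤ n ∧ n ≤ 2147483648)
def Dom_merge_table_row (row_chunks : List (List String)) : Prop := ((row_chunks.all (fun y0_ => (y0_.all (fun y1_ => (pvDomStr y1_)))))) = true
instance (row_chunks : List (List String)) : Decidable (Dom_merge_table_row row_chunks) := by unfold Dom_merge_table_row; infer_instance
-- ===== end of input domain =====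

-- B folds a binary zip-with-padding row merge over the chunks instead of A's preallocated width-sized buffer with nested index loops; objective: simpler.

-- ===== PORT A =====
-- body of A's inner 'for index in range(width)' loop
def pvStepA (chunk : List String) (m : List String) (index : Nat) : List String :=
  let value := if index < chunk.length then PySem.Str.strip (chunk[index]!) else ""
  if value ≠ "" then m.set index (m[index]! ++ value) else m

-- body of A's outer 'for chunk in row_chunks' loop
def pvRowA (width : Nat) (merged : List String) (chunk : List String) : List String :=
  (List.range width).foldl (pvStepA chunk) merged

def merge_table_row (row_chunks : List (List String)) : List String :=
  let width := (row_chunks.map (fun chunk => chunk.length)).foldl max 0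
  let merged : List String := List.replicate width ""
  row_chunks.foldl (pvRowA width) merged

-- ===== PORT B =====
-- B's '_merge2': zip the common prefix, then append the longer tail (stripping chunk cells)
def pvMerge2 (acc chunk : List String) : List String :=
  ((acc.zip chunk).map (fun p => p.1 ++ PySem.Str.strip p.2)) ++
    (if acc.length < chunk.length
     then (chunk.drop acc.length).map PySem.Str.strip
     else acc.drop chunk.length)

def merge_table_row_alt (row_chunks : List (List String)) : List String :=
  row_chunks.foldl pvMerge2 []

-- ===== PRECONDITION & SPEC =====
-- Python's max() raises ValueError on an empty sequence, so A raises exactly on row_chunks = []; Pre_ excludes only that input.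
def Pre_merge_table_row (row_chunks : List (List String)) : Prop := row_chunks ≠ []
instance (row_chunks : List (List String)) : Decidable (Pre_merge_table_row row_chunks) := by unfold Pre_merge_table_row; infer_instance
def pvWitness_merge_table_row : List (List String) := [["a", " b "], ["c"]]

def Spec_merge_table_row (row_chunks : List (List String)) (out : List String) : Prop := out = merge_table_row_alt row_chunks
instance (row_chunks : List (List String)) (out : List String) : Decidable (Spec_merge_table_row row_chunks out) := by unfold Spec_merge_table_row; infer_instance

-- ===== CLAIM (what is proved, stated in full; the proofs are below) =====
def Claim_equal_merge_table_row : Prop := ∀ (row_chunks : List (List String)), Dom_merge_table_row row_chunks → Pre_merge_table_row row_chunks → Spec_merge_table_row row_chunks (merge_table_row row_chunks)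

-- ===== LEMMAS AND PROOFS =====

-- the character contribution of chunk ch to column i (the single value both programs place there)
def pvCol (i : Nat) (ch : List String) : List Char :=
  if i < ch.length then (PySem.Str.strip (ch[i]!)).toList else []

theorem pvCol_succ (i : Nat) (c : String) (cs : List String) :
    pvCol (i + 1) (c :: cs) = pvCol i cs := by
  unfold pvCol
  simp

theorem pvStepA_length (chunk m : List String) (index : Nat) :
    (pvStepA chunk m index).length = m.length := by
  unfold pvStepA
  simp only []
  by_cases h : (if index < chunk.length then PySem.Str.strip (chunk[index]!) else "") ≠ ""
  · rw [if_pos h]; simp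
  · rw [if_neg h]

theorem pvInner_len (chunk : List String) (n : Nat) (m : List String) :
    ((List.range n).foldl (pvStepA chunk) m).length = m.length := by
  induction n with
  | zero => rfl
  | succ n ih =>
    rw [List.range_succ, List.foldl_append]
    simp only [List.foldl_cons, List.foldl_nil]
    rw [pvStepA_length, ih]

theorem pvInner_get (chunk : List String) (n : Nat) (m : List String) (i : Nat) (hi : i < m.length) :
    ((List.range n).foldl (pvStepA chunk) m)[i]? =
    if i < n then some (m[i]! ++ (if i < chunk.length then PySem.Str.strip (chunk[i]!) else "")) else m[i]? := by
  induction n with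
  | zero => simp
  | succ n ih =>
    rw [List.range_succ, List.foldl_append]
    simp only [List.foldl_cons, List.foldl_nil]
    set R := (List.range n).foldl (pvStepA chunk) m with hR
    have hRlen : R.length = m.length := pvInner_len chunk n m
    by_cases hin : i = n
    · subst hin
      have hRi : R[i]? = m[i]? := by rw [ih]; simp
      have hRig : R[i]! = m[i]! := by
        rw [getElem!_pos R i (by omega), getElem!_pos m i hi]
        rw [List.getElem?_eq_getElem (by omega : i < R.length), List.getElem?_eq_getElem hi] at hRi
        exact Option.some.inj hRi
      rw [if_pos (by omega : i < i + 1)]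
      unfold pvStepA
      simp only []
      by_cases hv : (if i < chunk.length then PySem.Str.strip (chunk[i]!) else "") ≠ ""
      · rw [if_pos hv, List.getElem?_set_self (by omega : i < R.length), hRig]
      · rw [if_neg hv]
        have hv' : (if i < chunk.length then PySem.Str.strip (chunk[i]!) else "") = "" :=
          not_not.mp hv
        rw [hRi, List.getElem?_eq_getElem hi, hv', String.append_empty, getElem!_pos m i hi]
    · have hne : n ≠ i := fun h => hin h.symm
      have step : (pvStepA chunk R n)[i]? = R[i]? := by
        unfold pvStepA
        simp only []
        by_cases hv : (if n < chunk.length then PySem.Str.strip (chunk[n]!) else "") ≠ ""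
        · rw [if_pos hv]; exact List.getElem?_set_ne hne
        · rw [if_neg hv]
      rw [step, ih]
      simp only [show (i < n + 1) ↔ i < n from by omega]

theorem pvOuter_len (width : Nat) (cs : List (List String)) (m : List String) :
    (cs.foldl (pvRowA width) m).length = m.length := by
  induction cs generalizing m with
  | nil => rfl
  | cons ch cs ih => simp only [List.foldl_cons]; rw [ih]; unfold pvRowA; exact pvInner_len ch width m

theorem pvOuter_get (width : Nat) (cs : List (List String)) (m : List String)
    (hm : m.length = width) (i : Nat) (hi : i < width) :
    (cs.foldl (pvRowA width) m)[i]!.toList = m[i]!.toList ++ (cs.map (pvCol i)).flatten := by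
  induction cs generalizing m with
  | nil => simp
  | cons ch cs ih =>
    simp only [List.foldl_cons]
    set m' := pvRowA width m ch with hm'
    have hm'len : m'.length = width := by rw [hm', pvRowA, pvInner_len, hm]
    have him : i < m.length := by omega
    have hget : m'[i]? = some (m[i]! ++ (if i < ch.length then PySem.Str.strip (ch[i]!) else "")) := by
      rw [hm', pvRowA, pvInner_get ch width m i him]
      simp [hi]
    have hgete : m'[i]! = m[i]! ++ (if i < ch.length then PySem.Str.strip (ch[i]!) else "") := by
      rw [getElem!_pos m' i (by omega)]
      rw [List.getElem?_eq_getElem (by omega : i < m'.length)] at hget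
      exact Option.some.inj hget
    rw [ih m' hm'len, hgete]
    have hcol : (m[i]! ++ (if i < ch.length then PySem.Str.strip (ch[i]!) else "")).toList
        = m[i]!.toList ++ pvCol i ch := by
      rw [String.toList_append, pvCol]
      split <;> simp
    rw [hcol]
    simp [List.append_assoc]

-- B-side structural facts about the binary merge
theorem pvMerge2_nil_left (ch : List String) :
    pvMerge2 [] ch = ch.map PySem.Str.strip := by
  cases ch <;> simp [pvMerge2]

theorem pvMerge2_nil_right (acc : List String) : pvMerge2 acc [] = acc := by
  simp [pvMerge2]

theorem pvMerge2_cons (a : String) (as : List String) (c : String) (cs : List String) :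
    pvMerge2 (a :: as) (c :: cs) = (a ++ PySem.Str.strip c) :: pvMerge2 as cs := by
  simp [pvMerge2]

theorem pvMerge2_len (acc ch : List String) :
    (pvMerge2 acc ch).length = max acc.length ch.length := by
  induction acc generalizing ch with
  | nil => rw [pvMerge2_nil_left]; simp
  | cons a as ih =>
    cases ch with
    | nil => rw [pvMerge2_nil_right]; simp
    | cons c cs =>
      rw [pvMerge2_cons]
      simp only [List.length_cons, ih]
      omega

theorem pvMerge2_get (acc ch : List String) (i : Nat) :
    ((pvMerge2 acc ch)[i]?.getD "").toList = (acc[i]?.getD "").toList ++ pvCol i ch := by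
  induction acc generalizing ch i with
  | nil =>
    rw [pvMerge2_nil_left]
    by_cases h : i < ch.length
    · rw [List.getElem?_eq_getElem (by simpa using h), List.getElem_map]
      simp [pvCol, h]
    · rw [List.getElem?_eq_none (by simpa using Nat.le_of_not_lt h)]
      simp [pvCol, h]
  | cons a as ih =>
    cases ch with
    | nil => rw [pvMerge2_nil_right]; simp [pvCol]
    | cons c cs =>
      rw [pvMerge2_cons]
      cases i with
      | zero =>
        simp only [List.getElem?_cons_zero, Option.getD_some]
        rw [String.toList_append]
        have : pvCol 0 (c :: cs) = (PySem.Str.strip c).toList := by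
          simp [pvCol]
        rw [this]
      | succ n =>
        simp only [List.getElem?_cons_succ]
        rw [ih, pvCol_succ]

theorem pvFoldB_len (cs : List (List String)) (acc : List String) :
    (cs.foldl pvMerge2 acc).length = (cs.map List.length).foldl max acc.length := by
  induction cs generalizing acc with
  | nil => rfl
  | cons ch cs ih =>
    simp only [List.foldl_cons, List.map_cons]
    rw [ih, pvMerge2_len]

theorem pvFoldB_get (cs : List (List String)) (acc : List String) (i : Nat) :
    ((cs.foldl pvMerge2 acc)[i]?.getD "").toList
      = (acc[i]?.getD "").toList ++ (cs.map (pvCol i)).flatten := by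
  induction cs generalizing acc with
  | nil => simp
  | cons ch cs ih =>
    simp only [List.foldl_cons, List.map_cons, List.flatten_cons]
    rw [ih, pvMerge2_get]
    simp [List.append_assoc]

-- ===== VERDICT (by name: the statement is the Claim_ definition above) =====
theorem merge_table_row_spec : Claim_equal_merge_table_row := by
  unfold Claim_equal_merge_table_row
  intro rc _ _
  unfold Spec_merge_table_row merge_table_row merge_table_row_alt
  simp only []
  set width := (rc.map (fun chunk => chunk.length)).foldl max 0 with hw
  set m0 : List String := List.replicate width "" with hm0
  have hm0len : m0.length = width := by simp [hm0]
  have hAlen : (rc.foldl (pvRowA width) m0).length = width := by rw [pvOuter_len, hm0len]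
  have hBlen : (rc.foldl pvMerge2 []).length = width := by
    rw [pvFoldB_len]; simp [hw]
  apply List.ext_getElem (by rw [hAlen, hBlen])
  intro i hiA hiB
  have hi : i < width := by omega
  apply String.toList_inj.mp
  rw [← getElem!_pos _ i hiA]
  rw [pvOuter_get width rc m0 hm0len i hi]
  have hm0i : m0[i]! = "" := by
    rw [hm0, getElem!_pos _ i (by simpa using hi)]
    simp
  rw [hm0i]
  have hB : ((rc.foldl pvMerge2 [])[i]?.getD "").toList = (rc.map (pvCol i)).flatten := by
    rw [pvFoldB_get]; rfl
  rw [List.getElem?_eq_getElem hiB, Option.getD_some] at hB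
  rw [hB]
  rfl
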